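-- pv_equiv track=rewrite | github.com/SirEOF/ctf-crypto | substitution/sub.py | getStringsForKeyLength
-- ===== SOURCE A (Python) =====
-- def getStringsForKeyLength(keylength, text):
-- 	assert isinstance(keylength, int)
-- 	assert isinstance(text, str)
--
-- 	text = text.replace(' ', '')
--
-- 	result = []
--
-- 	for start in range(0, keylength):
-- 		out = ''
-- 		for i in range(start, len(text), keylength):
-- 			out += text[i]
-- 		result.append(out)
-- 	return result
-- ===== SOURCE B (Python) =====
-- def getStringsForKeyLength(keylength, text):
-- 	assert isinstance(keylength, int)
-- 	assert isinstance(text, str)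
--
-- 	if keylength <= 0:
-- 		return []
--
-- 	stripped = text.replace(' ', '')
-- 	buckets = [[] for _ in range(keylength)]
-- 	for i, c in enumerate(stripped):
-- 		buckets[i % keylength].append(c)
-- 	return [''.join(b) for b in buckets]
-- ===== Notes on version B (the rewrite author's own statement) =====
-- stated objective: alternative
-- what changed: replaces A's per-offset strided scans over the text (one inner loop per key position, re-walking the string with string concatenation) by a single pass over enumerate(text) that appends each character to buckets[i % keylength], joined at the end; keylength <= 0 short-circuits to [] as A's empty range does
import Mathlib
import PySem

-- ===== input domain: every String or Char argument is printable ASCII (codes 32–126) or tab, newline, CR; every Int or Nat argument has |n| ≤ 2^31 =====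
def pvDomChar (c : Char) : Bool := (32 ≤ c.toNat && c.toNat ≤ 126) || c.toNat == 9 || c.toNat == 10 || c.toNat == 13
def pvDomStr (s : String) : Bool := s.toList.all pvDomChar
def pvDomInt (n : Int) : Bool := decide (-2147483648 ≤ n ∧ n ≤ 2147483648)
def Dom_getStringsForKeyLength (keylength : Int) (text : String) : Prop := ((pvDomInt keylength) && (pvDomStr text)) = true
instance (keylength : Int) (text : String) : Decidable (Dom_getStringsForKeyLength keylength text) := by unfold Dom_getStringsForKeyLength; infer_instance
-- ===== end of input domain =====

-- B replaces A's per-offset strided scans by a single bucketing pass over the enumerated text (objective: alternative decomposition, same cost).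

-- ===== PORT A =====
-- text[i] is always in range here (i comes from range(start, len(text), keylength)), so the pyGetD default is never read.
def getStringsForKeyLength (keylength : Int) (text : String) : List String :=
  let t := PySem.Chars.replace text.toList [' '] []
  (PySem.List.pyRange 0 keylength 1).foldl
    (fun result start =>
      result ++ [String.ofList ((PySem.List.pyRange start (PySem.List.len t) keylength).foldl
        (fun out i => out ++ [PySem.List.pyGetD t i ' ']) ([] : List Char))])
    []

-- ===== PORT B =====
def getStringsForKeyLength_alt (keylength : Int) (text : String) : List String :=
  if keylength ≤ 0 then []
  else
    let stripped := PySem.Chars.replace text.toList [' '] []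
    let buckets : List (List Char) := List.replicate keylength.toNat []
    let buckets := (PySem.List.enumerate stripped).foldl
      (fun bs p =>
        PySem.List.pySetD bs (PySem.Int.mod p.1 keylength)
          (PySem.List.pyGetD bs (PySem.Int.mod p.1 keylength) [] ++ [p.2]))
      buckets
    buckets.map (fun b => String.ofList b)

-- ===== PRECONDITION & SPEC =====
def Spec_getStringsForKeyLength (keylength : Int) (text : String) (out : List String) : Prop := out = getStringsForKeyLength_alt keylength text
instance (keylength : Int) (text : String) (out : List String) : Decidable (Spec_getStringsForKeyLength keylength text out) := by unfold Spec_getStringsForKeyLength; infer_instance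

-- ===== CLAIM (what is proved, stated in full; the proofs are below) =====
def Claim_equal_getStringsForKeyLength : Prop := ∀ (keylength : Int) (text : String), Dom_getStringsForKeyLength keylength text → Spec_getStringsForKeyLength keylength text (getStringsForKeyLength keylength text)

-- ===== LEMMAS AND PROOFS =====

-- Two strictly increasing Int lists with the same members are equal.
lemma eq_of_sorted_mem (l1 l2 : List Int) (h1 : l1.Pairwise (· < ·)) (h2 : l2.Pairwise (· < ·))
    (h : ∀ x, x ∈ l1 ↔ x ∈ l2) : l1 = l2 := by
  refine List.Perm.eq_of_pairwise (fun a b _ _ ha hb => absurd hb (lt_asymm ha)) h1 h2 ?_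
  rw [List.perm_ext_iff_of_nodup (h1.imp ne_of_lt) (h2.imp ne_of_lt)]
  exact h

-- A's j-th column indices (j, j+K, j+2K, … below n) are exactly the i < n with i % K = j.
lemma pyRange_step_eq_filter (K j n : Nat) (hK : 0 < K) (hj : j < K) :
    PySem.List.pyRange (j : Int) (n : Int) (K : Int) =
      List.map (fun i : Nat => (i : Int)) (List.filter (fun i => i % K == j) (List.range n)) := by
  have hKZ : (0 : Int) < (K : Int) := by exact_mod_cast hK
  apply eq_of_sorted_mem
  · rw [PySem.List.pyRange_of_pos _ _ hKZ]
    refine List.Pairwise.map _ (fun a b hab => ?_) (List.pairwise_lt_range)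
    have : (a : Int) < b := by exact_mod_cast hab
    nlinarith
  · refine List.Pairwise.map _ (fun a b hab => ?_) (List.Pairwise.filter _ List.pairwise_lt_range)
    exact_mod_cast hab
  · intro x
    rw [PySem.List.mem_pyRange_iff_of_pos hKZ]
    simp only [List.mem_map, List.mem_filter, List.mem_range, beq_iff_eq]
    constructor
    · rintro ⟨hjx, hxn, q, hq⟩
      have hq0 : 0 ≤ q := by
        by_contra hneg
        push Not at hneg
        have := mul_neg_of_pos_of_neg hKZ hneg
        omega
      have hx : x = ((K * q.toNat + j : Nat) : Int) := by
        have hqq : q = (q.toNat : Int) := (Int.toNat_of_nonneg hq0).symm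
        push_cast
        rw [← hqq]
        linarith
      refine ⟨K * q.toNat + j, ⟨by omega, ?_⟩, hx.symm⟩
      rw [Nat.mul_add_mod]
      exact Nat.mod_eq_of_lt hj
    · rintro ⟨i, ⟨hin, him⟩, rfl⟩
      have hji : j ≤ i := him ▸ Nat.mod_le i K
      refine ⟨by exact_mod_cast hji, by exact_mod_cast hin, ((i / K : Nat) : Int), ?_⟩
      have h2 : K * (i / K) + j = i := by conv_rhs => rw [← Nat.div_add_mod i K, him]
      calc (i:Int) - (j:Int) = ((K * (i / K) + j : Nat) : Int) - (j:Int) := by rw [h2]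
        _ = (K:Int) * ((i / K : Nat) : Int) := by push_cast; ring

-- Updating position j < K of a map over range K updates the function at j.
lemma set_map_range {β : Type} (f : Nat → β) (K j : Nat) (v : β) (_hj : j < K) :
    (List.map f (List.range K)).set j v
      = List.map (fun i => if i = j then v else f i) (List.range K) := by
  apply List.ext_getElem
  · simp
  · intro i h1 h2
    simp only [List.getElem_set, List.getElem_map, List.getElem_range]
    by_cases h : j = i <;> simp [h, eq_comm]

-- B's bucketing fold over the first m positions produces the filtered columns.
lemma buckets_fold (cs : List Char) (K : Nat) (hK : 0 < K) (m : Nat) :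
    (List.range m).foldl
        (fun bs i => bs.set (i % K) (bs.getD (i % K) [] ++ [cs.getD i ' ']))
        (List.replicate K ([] : List Char))
      = List.map (fun j => ((List.range m).filter (fun i => i % K == j)).map (fun i => cs.getD i ' '))
          (List.range K) := by
  induction m with
  | zero => simp [List.map_const']
  | succ m ih =>
    rw [List.range_succ, List.foldl_append, List.foldl_cons, List.foldl_nil, ih]
    rw [PySem.List.getD_map_range _ _ _ _ (Nat.mod_lt m hK)]
    rw [set_map_range _ _ _ _ (Nat.mod_lt m hK)]
    apply List.map_congr_left
    intro j hjm
    rw [List.filter_append]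
    by_cases h : m % K = j
    · simp [h]
    · simp [h, Ne.symm h]

-- ===== VERDICT (by name: the statement is the Claim_ definition above) =====
theorem getStringsForKeyLength_spec : Claim_equal_getStringsForKeyLength := by
  intro keylength text _
  unfold Spec_getStringsForKeyLength getStringsForKeyLength getStringsForKeyLength_alt
  by_cases hk : keylength ≤ 0
  · rw [if_pos hk]
    rw [PySem.List.pyRange_one_eq_nil hk]
    rfl
  · rw [if_neg hk]
    obtain ⟨K, rfl⟩ : ∃ K : Nat, keylength = (K:Int) :=
      ⟨keylength.toNat, (Int.toNat_of_nonneg (by omega)).symm⟩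
    have hK0 : 0 < K := by exact_mod_cast not_le.mp hk
    set t := PySem.Chars.replace text.toList [' '] [] with ht
    -- A side: turn both foldl-appends into maps over the ranges
    simp only [PySem.List.foldl_append_singleton_eq_map, List.nil_append, PySem.List.len_eq,
      PySem.List.pyRange_zero_natCast, List.foldl_map, Int.toNat_natCast]
    -- B side: enumerate as a map over range, then the bucketing fold
    rw [PySem.List.enumerate_eq_map_pyRange t ' ', PySem.List.len_eq,
      PySem.List.pyRange_zero_natCast, List.foldl_map, List.foldl_map]
    simp only [PySem.Int.mod_natCast, PySem.List.pySetD_natCast, PySem.List.pyGetD_natCast]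
    rw [buckets_fold t K hK0 t.length, List.map_map]
    apply List.map_congr_left
    intro j hj
    rw [List.mem_range] at hj
    rw [pyRange_step_eq_filter K j t.length hK0 hj, List.map_map]
    refine congrArg String.ofList (List.map_congr_left (fun i _ => ?_))
    simp [PySem.List.pyGetD_natCast, List.getD_eq_getElem?_getD]
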